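-- pv_equiv track=rewrite | github.com/tonyswartz/atlas | tools/telegram/commands.py | _insert_bullet
-- ===== SOURCE A (Python) =====
-- def _insert_bullet(note: str, section: str, bullet: str) -> str:
--     """Insert `- bullet` under the first `## section` heading. Appends section if missing."""
--     lines = note.splitlines(True)
--     out: list[str] = []
--     inserted = False
--     for line in lines:
--         out.append(line)
--         if not inserted and line.strip() == f"## {section}":
--             out.append(f"- {bullet}\n")
--             inserted = True
--     if not inserted:
--         if note and not note.endswith("\n"):
--             out.append("\n")
--         out.append(f"\n## {section}\n- {bullet}\n")
--     return "".join(out)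
-- ===== SOURCE B (Python) =====
-- def _insert_bullet(note: str, section: str, bullet: str) -> str:
--     """Insert `- bullet` under the first `## section` heading. Appends section if missing."""
--     lines = note.splitlines(True)
--     target = f"## {section}"
--     idx = next((i for i, l in enumerate(lines) if l.strip() == target), None)
--     if idx is None:
--         pad = "\n" if note and not note.endswith("\n") else ""
--         return note + pad + f"\n## {section}\n- {bullet}\n"
--     return "".join(lines[:idx + 1]) + f"- {bullet}\n" + "".join(lines[idx + 1:])
-- ===== Notes on version B (the rewrite author's own statement) =====
-- stated objective: simpler
-- what changed: Separates locating the first matching '## section' heading (index search) from assembling the output (string slicing/concatenation), replacing A's interleaved append-with-flag loop; the missing-section case is computed directly from note instead of re-joining the line list.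
import Mathlib
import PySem

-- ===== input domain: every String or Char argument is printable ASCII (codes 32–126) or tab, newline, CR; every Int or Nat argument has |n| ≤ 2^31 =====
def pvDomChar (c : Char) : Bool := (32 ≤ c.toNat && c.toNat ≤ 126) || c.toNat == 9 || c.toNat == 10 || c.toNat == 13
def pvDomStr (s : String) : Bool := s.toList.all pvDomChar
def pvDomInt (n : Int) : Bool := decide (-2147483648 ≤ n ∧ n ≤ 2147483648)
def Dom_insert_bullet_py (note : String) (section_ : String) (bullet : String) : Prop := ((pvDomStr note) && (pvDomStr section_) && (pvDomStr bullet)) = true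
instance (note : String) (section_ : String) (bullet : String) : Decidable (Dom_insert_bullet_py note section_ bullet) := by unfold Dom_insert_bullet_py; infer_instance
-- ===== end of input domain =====

-- B separates locating the heading from assembling the output (slice-based), instead of A's
-- interleaved append-with-flag loop; same linear cost (objective: simpler).

-- Hand port of str.splitlines(keepends=True); exact on the Dom alphabet, where the only
-- line boundaries are '\n', '\r' and '\r\n'.  (Shared by both ports: both Pythons call it.)
def pvSlk : List Char → List (List Char)
  | [] => []
  | c :: t =>
    if c = '\n' then ['\n'] :: pvSlk t
    else if c = '\r' then
      if t.head? = some '\n' then ['\r', '\n'] :: pvSlk t.tail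
      else ['\r'] :: pvSlk t
    else
      match pvSlk t with
      | [] => [[c]]
      | l :: ls => (c :: l) :: ls
  termination_by cs => cs.length
  decreasing_by all_goals simp <;> omega

-- ===== PORT A =====
-- the body of A's for-loop: out.append(line); conditionally append the bullet and set the flag
def pvStep (P : List Char → Bool) (bline : List Char)
    (st : List (List Char) × Bool) (line : List Char) : List (List Char) × Bool :=
  let out := st.1 ++ [line]
  if !st.2 && P line then (out ++ [bline], true) else (out, st.2)

def insert_bullet_py (note : String) (section_ : String) (bullet : String) : String :=
  let lines := pvSlk note.toList
  let target := ['#', '#', ' '] ++ section_.toList              -- f"## {section}"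
  let bline := '-' :: ' ' :: bullet.toList ++ ['\n']            -- f"- {bullet}\n"
  let st := lines.foldl (pvStep (fun line => PySem.Chars.strip line == target) bline) ([], false)
  let out :=
    if !st.2 then
      let out1 := if !(note == "") && !(PySem.Str.endswith note "\n") then st.1 ++ [['\n']] else st.1
      out1 ++ ['\n' :: target ++ ['\n'] ++ bline]               -- f"\n## {section}\n- {bullet}\n"
    else st.1
  String.mk out.flatten                                         -- "".join(out)

-- ===== PORT B =====
def insert_bullet_py_alt (note : String) (section_ : String) (bullet : String) : String :=
  let lines := pvSlk note.toList
  let target := ['#', '#', ' '] ++ section_.toList              -- f"## {section}"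
  match lines.findIdx? (fun l => PySem.Chars.strip l == target) with   -- next((i for i,l in enumerate(lines) if …), None)
  | none =>
    let pad := if !(note == "") && !(PySem.Str.endswith note "\n") then ['\n'] else []
    String.mk (note.toList ++ pad ++ '\n' :: target ++ '\n' :: '-' :: ' ' :: bullet.toList ++ ['\n'])
  | some i =>
    String.mk ((lines.take (i + 1)).flatten ++ '-' :: ' ' :: bullet.toList ++ ['\n'] ++ (lines.drop (i + 1)).flatten)

-- ===== PRECONDITION & SPEC =====
def Spec_insert_bullet_py (note : String) (section_ : String) (bullet : String) (out : String) : Prop := out = insert_bullet_py_alt note section_ bullet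
instance (note : String) (section_ : String) (bullet : String) (out : String) : Decidable (Spec_insert_bullet_py note section_ bullet out) := by unfold Spec_insert_bullet_py; infer_instance

-- ===== CLAIM (what is proved, stated in full; the proofs are below) =====
def Claim_equal_insert_bullet_py : Prop := ∀ (note : String) (section_ : String) (bullet : String), Dom_insert_bullet_py note section_ bullet → Spec_insert_bullet_py note section_ bullet (insert_bullet_py note section_ bullet)

-- ===== LEMMAS AND PROOFS =====

theorem flatten_pvSlk (cs : List Char) : (pvSlk cs).flatten = cs := by
  induction cs using pvSlk.induct with
  | case1 => simp [pvSlk]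
  | case2 t ih => simp [pvSlk, ih]
  | case3 t h1 h2 ih =>
      obtain ⟨t', rfl⟩ : ∃ t', t = '\n' :: t' := by
        cases t with
        | nil => simp at h1
        | cons d t' =>
            simp at h1
            exact ⟨t', by rw [h1]⟩
      simp [pvSlk] at ih ⊢
      exact ih
  | case4 t h1 h2 ih => simp [pvSlk, h1, ih]
  | case5 c t h1 h2 h3 ih =>
      rw [h3] at ih
      simp at ih
      simp [pvSlk, h1, h2, h3, ← ih]
  | case6 c t h1 h2 l ls h3 ih =>
      rw [h3] at ih
      simp only [pvSlk, if_neg h1, if_neg h2, h3]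
      simp at ih ⊢
      exact ih

-- A's loop once `inserted` is true just appends every remaining line.
theorem loop_true (P : List Char → Bool) (bline : List Char)
    (ls : List (List Char)) (acc : List (List Char)) :
    ls.foldl (pvStep P bline) (acc, true) = (acc ++ ls, true) := by
  induction ls generalizing acc with
  | nil => simp
  | cons l ls ih =>
      rw [List.foldl_cons]
      have hs : pvStep P bline (acc, true) l = (acc ++ [l], true) := by simp [pvStep]
      rw [hs, ih]; simp

-- Characterisation of A's loop from a fresh (not-yet-inserted) state, in terms of the
-- index of the first matching line.
theorem loop_spec (P : List Char → Bool) (bline : List Char)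
    (ls : List (List Char)) (acc : List (List Char)) :
    ls.foldl (pvStep P bline) (acc, false) =
      match ls.findIdx? P with
      | none => (acc ++ ls, false)
      | some i => (acc ++ ls.take (i + 1) ++ [bline] ++ ls.drop (i + 1), true) := by
  induction ls generalizing acc with
  | nil => simp
  | cons l ls ih =>
      rw [List.foldl_cons]
      by_cases h : P l = true
      · have hs : pvStep P bline (acc, false) l = (acc ++ [l] ++ [bline], true) := by
          simp [pvStep, h]
        rw [hs, loop_true]
        simp [List.findIdx?_cons, h]
      · have h' : P l = false := by simpa using h
        have hs : pvStep P bline (acc, false) l = (acc ++ [l], false) := by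
          simp [pvStep, h']
        rw [hs, ih]
        simp only [List.findIdx?_cons, h', Bool.false_eq_true, if_false]
        cases hf : ls.findIdx? P <;> simp [hf]

-- ===== VERDICT (by name: the statement is the Claim_ definition above) =====
theorem insert_bullet_py_spec : Claim_equal_insert_bullet_py := by
  intro note section_ bullet _
  show insert_bullet_py note section_ bullet = insert_bullet_py_alt note section_ bullet
  unfold insert_bullet_py insert_bullet_py_alt
  simp only [loop_spec]
  cases hf : (pvSlk note.toList).findIdx? (fun l => PySem.Chars.strip l == (['#', '#', ' '] ++ section_.toList)) with
  | none =>
      simp only [hf]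
      by_cases hc : ¬note = "" ∧ PySem.Chars.endswith note.toList ['\n'] = false <;>
        simp [hc, flatten_pvSlk, List.flatten_append]
  | some i =>
      simp only [hf]
      simp [List.flatten_append]
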